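-- pv_equiv track=rewrite | github.com/ChaissonLab/raava | script/gt.annot.py | g2es
-- ===== SOURCE A (Python) =====
-- def g2es(gf):
--     es = set()
--     for km, bits in gf.items():
--         kl = km << 2
--         for i in range(4):
--             if bits%2:
--                 e = kl + i
--                 es.add(e)
--             bits >>= 1
--     return es
-- ===== SOURCE B (Python) =====
-- # Nibble lookup table: NIBBLE[b] lists the set bit positions of b (0 <= b < 16).
-- NIBBLE = ((), (0,), (1,), (0, 1), (2,), (0, 2), (1, 2), (0, 1, 2),
--           (3,), (0, 3), (1, 3), (0, 1, 3), (2, 3), (0, 2, 3), (1, 2, 3), (0, 1, 2, 3))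
--
-- def g2es(gf):
--     es = set()
--     for km, bits in gf.items():
--         base = km << 2
--         for off in NIBBLE[bits % 16]:
--             es.add(base + off)
--     return es
-- ===== Notes on version B (the rewrite author's own statement) =====
-- stated objective: idiomatic
-- what changed: Replaces the per-entry 4-step shift/test loop over mutable bits with a single low-nibble lookup (bits % 16) in a precomputed 16-entry table of set-bit offsets.
import Mathlib
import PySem

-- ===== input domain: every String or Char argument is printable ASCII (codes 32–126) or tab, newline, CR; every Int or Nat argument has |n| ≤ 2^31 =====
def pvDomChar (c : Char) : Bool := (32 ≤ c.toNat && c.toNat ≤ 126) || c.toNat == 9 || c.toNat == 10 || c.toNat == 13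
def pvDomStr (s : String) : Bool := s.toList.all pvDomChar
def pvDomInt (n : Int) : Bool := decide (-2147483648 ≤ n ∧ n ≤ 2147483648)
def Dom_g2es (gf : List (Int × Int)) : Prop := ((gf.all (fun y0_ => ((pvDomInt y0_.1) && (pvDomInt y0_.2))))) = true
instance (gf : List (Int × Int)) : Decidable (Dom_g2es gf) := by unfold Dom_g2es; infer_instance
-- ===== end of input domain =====

-- B replaces A's per-entry 4-step shift/test loop over mutable bits with one low-nibble (bits % 16) lookup in a fixed 16-entry table of set-bit offsets (idiomatic; same cost).

-- ===== PORT A =====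
def g2es (gf : List (Int × Int)) : List Int :=
  gf.foldl (fun es p =>
    let kl : Int := (p.1 : Int) <<< (2 : Nat)
    ((PySem.List.pyRange 0 4 1).foldl (fun (st : List Int × Int) i =>
        let es' := if PySem.Int.mod st.2 2 ≠ 0 then PySem.Set.add st.1 (kl + i) else st.1
        (es', st.2 >>> (1 : Nat)))
      (es, p.2)).1)
    PySem.Set.empty

-- ===== PORT B =====
def nibbleTable : List (List Int) :=
  [[], [0], [1], [0, 1], [2], [0, 2], [1, 2], [0, 1, 2],
   [3], [0, 3], [1, 3], [0, 1, 3], [2, 3], [0, 2, 3], [1, 2, 3], [0, 1, 2, 3]]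

def g2es_alt (gf : List (Int × Int)) : List Int :=
  gf.foldl (fun es p =>
    let base : Int := (p.1 : Int) <<< (2 : Nat)
    (nibbleTable.getD (PySem.Int.mod p.2 16).toNat []).foldl
      (fun es off => PySem.Set.add es (base + off)) es)
    PySem.Set.empty

-- ===== PRECONDITION & SPEC =====
-- Pre_ excludes association lists with duplicate keys: the Python argument is a dict, which cannot hold them.
def Pre_g2es (gf : List (Int × Int)) : Prop := (gf.map Prod.fst).Nodup
instance (gf : List (Int × Int)) : Decidable (Pre_g2es gf) := by unfold Pre_g2es; infer_instance
def pvWitness_g2es : (List (Int × Int)) := [(1, 5), (-2, -1), (0, 16)]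

def Spec_g2es (gf : List (Int × Int)) (out : List Int) : Prop := out = g2es_alt gf
instance (gf : List (Int × Int)) (out : List Int) : Decidable (Spec_g2es gf out) := by unfold Spec_g2es; infer_instance

-- ===== CLAIM (what is proved, stated in full; the proofs are below) =====
def Claim_equal_g2es : Prop := ∀ (gf : List (Int × Int)), Dom_g2es gf → Pre_g2es gf → Spec_g2es gf (g2es gf)

-- ===== LEMMAS AND PROOFS =====

-- The inner per-entry computations agree: A's 4-step bit loop equals B's nibble lookup.
lemma inner_eq (es : List Int) (kl bits : Int) :
    ((PySem.List.pyRange 0 4 1).foldl (fun (st : List Int × Int) i =>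
        let es' := if PySem.Int.mod st.2 2 ≠ 0 then PySem.Set.add st.1 (kl + i) else st.1
        (es', st.2 >>> (1 : Nat)))
      (es, bits)).1
    = (nibbleTable.getD (PySem.Int.mod bits 16).toNat []).foldl
        (fun es off => PySem.Set.add es (kl + off)) es := by
  have hr : PySem.List.pyRange 0 4 1 = [0, 1, 2, 3] := by decide
  have h2 : ∀ x : Int, PySem.Int.mod x 2 = x % 2 :=
    fun x => PySem.Int.mod_eq_emod_of_pos (by norm_num)
  have h16 : PySem.Int.mod bits 16 = bits % 16 :=
    PySem.Int.mod_eq_emod_of_pos (by norm_num)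
  have hs : ∀ x : Int, x >>> (1 : Nat) = x / 2 := by
    intro x; simpa using Int.shiftRight_eq_div_pow x 1
  rw [hr, h16]
  simp only [List.foldl, h2, hs]
  have h : bits % 16 = 0 ∨ bits % 16 = 1 ∨ bits % 16 = 2 ∨ bits % 16 = 3 ∨ bits % 16 = 4 ∨ bits % 16 = 5 ∨ bits % 16 = 6 ∨ bits % 16 = 7 ∨ bits % 16 = 8 ∨ bits % 16 = 9 ∨ bits % 16 = 10 ∨ bits % 16 = 11 ∨ bits % 16 = 12 ∨ bits % 16 = 13 ∨ bits % 16 = 14 ∨ bits % 16 = 15 := by omega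
  rcases h with h|h|h|h|h|h|h|h|h|h|h|h|h|h|h|h
  · have c0 : bits % 2 = 0 := by omega
    have c1 : bits / 2 % 2 = 0 := by omega
    have c2 : bits / 2 / 2 % 2 = 0 := by omega
    have c3 : bits / 2 / 2 / 2 % 2 = 0 := by omega
    rw [h]; simp [c0, c1, c2, c3, nibbleTable]
  · have c0 : bits % 2 = 1 := by omega
    have c1 : bits / 2 % 2 = 0 := by omega
    have c2 : bits / 2 / 2 % 2 = 0 := by omega
    have c3 : bits / 2 / 2 / 2 % 2 = 0 := by omega
    rw [h]; simp [c0, c1, c2, c3, nibbleTable]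
  · have c0 : bits % 2 = 0 := by omega
    have c1 : bits / 2 % 2 = 1 := by omega
    have c2 : bits / 2 / 2 % 2 = 0 := by omega
    have c3 : bits / 2 / 2 / 2 % 2 = 0 := by omega
    rw [h]; simp [c0, c1, c2, c3, nibbleTable]
  · have c0 : bits % 2 = 1 := by omega
    have c1 : bits / 2 % 2 = 1 := by omega
    have c2 : bits / 2 / 2 % 2 = 0 := by omega
    have c3 : bits / 2 / 2 / 2 % 2 = 0 := by omega
    rw [h]; simp [c0, c1, c2, c3, nibbleTable]
  · have c0 : bits % 2 = 0 := by omega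
    have c1 : bits / 2 % 2 = 0 := by omega
    have c2 : bits / 2 / 2 % 2 = 1 := by omega
    have c3 : bits / 2 / 2 / 2 % 2 = 0 := by omega
    rw [h]; simp [c0, c1, c2, c3, nibbleTable]
  · have c0 : bits % 2 = 1 := by omega
    have c1 : bits / 2 % 2 = 0 := by omega
    have c2 : bits / 2 / 2 % 2 = 1 := by omega
    have c3 : bits / 2 / 2 / 2 % 2 = 0 := by omega
    rw [h]; simp [c0, c1, c2, c3, nibbleTable]
  · have c0 : bits % 2 = 0 := by omega
    have c1 : bits / 2 % 2 = 1 := by omega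
    have c2 : bits / 2 / 2 % 2 = 1 := by omega
    have c3 : bits / 2 / 2 / 2 % 2 = 0 := by omega
    rw [h]; simp [c0, c1, c2, c3, nibbleTable]
  · have c0 : bits % 2 = 1 := by omega
    have c1 : bits / 2 % 2 = 1 := by omega
    have c2 : bits / 2 / 2 % 2 = 1 := by omega
    have c3 : bits / 2 / 2 / 2 % 2 = 0 := by omega
    rw [h]; simp [c0, c1, c2, c3, nibbleTable]
  · have c0 : bits % 2 = 0 := by omega
    have c1 : bits / 2 % 2 = 0 := by omega
    have c2 : bits / 2 / 2 % 2 = 0 := by omega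
    have c3 : bits / 2 / 2 / 2 % 2 = 1 := by omega
    rw [h]; simp [c0, c1, c2, c3, nibbleTable]
  · have c0 : bits % 2 = 1 := by omega
    have c1 : bits / 2 % 2 = 0 := by omega
    have c2 : bits / 2 / 2 % 2 = 0 := by omega
    have c3 : bits / 2 / 2 / 2 % 2 = 1 := by omega
    rw [h]; simp [c0, c1, c2, c3, nibbleTable]
  · have c0 : bits % 2 = 0 := by omega
    have c1 : bits / 2 % 2 = 1 := by omega
    have c2 : bits / 2 / 2 % 2 = 0 := by omega
    have c3 : bits / 2 / 2 / 2 % 2 = 1 := by omega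
    rw [h]; simp [c0, c1, c2, c3, nibbleTable]
  · have c0 : bits % 2 = 1 := by omega
    have c1 : bits / 2 % 2 = 1 := by omega
    have c2 : bits / 2 / 2 % 2 = 0 := by omega
    have c3 : bits / 2 / 2 / 2 % 2 = 1 := by omega
    rw [h]; simp [c0, c1, c2, c3, nibbleTable]
  · have c0 : bits % 2 = 0 := by omega
    have c1 : bits / 2 % 2 = 0 := by omega
    have c2 : bits / 2 / 2 % 2 = 1 := by omega
    have c3 : bits / 2 / 2 / 2 % 2 = 1 := by omega
    rw [h]; simp [c0, c1, c2, c3, nibbleTable]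
  · have c0 : bits % 2 = 1 := by omega
    have c1 : bits / 2 % 2 = 0 := by omega
    have c2 : bits / 2 / 2 % 2 = 1 := by omega
    have c3 : bits / 2 / 2 / 2 % 2 = 1 := by omega
    rw [h]; simp [c0, c1, c2, c3, nibbleTable]
  · have c0 : bits % 2 = 0 := by omega
    have c1 : bits / 2 % 2 = 1 := by omega
    have c2 : bits / 2 / 2 % 2 = 1 := by omega
    have c3 : bits / 2 / 2 / 2 % 2 = 1 := by omega
    rw [h]; simp [c0, c1, c2, c3, nibbleTable]
  · have c0 : bits % 2 = 1 := by omega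
    have c1 : bits / 2 % 2 = 1 := by omega
    have c2 : bits / 2 / 2 % 2 = 1 := by omega
    have c3 : bits / 2 / 2 / 2 % 2 = 1 := by omega
    rw [h]; simp [c0, c1, c2, c3, nibbleTable]

lemma fold_eq (gf : List (Int × Int)) : ∀ es : List Int,
    gf.foldl (fun es p =>
      let kl : Int := (p.1 : Int) <<< (2 : Nat)
      ((PySem.List.pyRange 0 4 1).foldl (fun (st : List Int × Int) i =>
          let es' := if PySem.Int.mod st.2 2 ≠ 0 then PySem.Set.add st.1 (kl + i) else st.1
          (es', st.2 >>> (1 : Nat)))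
        (es, p.2)).1) es
    = gf.foldl (fun es p =>
        let base : Int := (p.1 : Int) <<< (2 : Nat)
        (nibbleTable.getD (PySem.Int.mod p.2 16).toNat []).foldl
          (fun es off => PySem.Set.add es (base + off)) es) es := by
  induction gf with
  | nil => intro es; rfl
  | cons p tl ih =>
      intro es
      simp only [List.foldl]
      rw [inner_eq]
      exact ih _

-- ===== VERDICT (by name: the statement is the Claim_ definition above) =====
theorem g2es_spec : Claim_equal_g2es := by
  intro gf _ _
  unfold Spec_g2es g2es g2es_alt
  exact fold_eq gf PySem.Set.empty
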